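-- pv_equiv track=rewrite | github.com/zuoyifan132/ToolAce | toolace/dlv/rule_checker.py | _infer_dialog_type_from_calls
-- ===== SOURCE A (Python) =====
-- from typing import Dict, List, Optional, Any, Set
--
-- def _infer_dialog_type_from_calls(function_calls: List[Dict]) -> Optional[str]:
--     """Infer dialog type from function calls"""
--     if not function_calls:
--         return "non_tool"
--
--     # Count unique APIs called
--     unique_apis = set(call.get("name") for call in function_calls if call.get("name"))
--
--     if len(unique_apis) == 1 and len(function_calls) == 1:
--         return "single"
--     elif len(unique_apis) > 1:
--         # Check if calls are in same turn (parallel) or different turns (dependent)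
--         # This is a simplified check - actual implementation would be more sophisticated
--         return "parallel"  # Simplified assumption
--     else:
--         return "single"
-- ===== SOURCE B (Python) =====
-- from typing import Dict, List, Optional
--
-- def _infer_dialog_type_from_calls(function_calls: List[Dict]) -> Optional[str]:
--     """Infer dialog type from function calls (single scan, no set)."""
--     if not function_calls:
--         return "non_tool"
--     first = None
--     for call in function_calls:
--         name = call.get("name")
--         if name:
--             if first is None:
--                 first = name
--             elif name != first:
--                 return "parallel"
--     return "single"
-- ===== Notes on version B (the rewrite author's own statement) =====
-- stated objective: simpler
-- what changed: Replaces building a set of all truthy names with a single early-exit scan that tracks only the first truthy name and returns 'parallel' as soon as a second distinct one appears.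
import Mathlib
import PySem

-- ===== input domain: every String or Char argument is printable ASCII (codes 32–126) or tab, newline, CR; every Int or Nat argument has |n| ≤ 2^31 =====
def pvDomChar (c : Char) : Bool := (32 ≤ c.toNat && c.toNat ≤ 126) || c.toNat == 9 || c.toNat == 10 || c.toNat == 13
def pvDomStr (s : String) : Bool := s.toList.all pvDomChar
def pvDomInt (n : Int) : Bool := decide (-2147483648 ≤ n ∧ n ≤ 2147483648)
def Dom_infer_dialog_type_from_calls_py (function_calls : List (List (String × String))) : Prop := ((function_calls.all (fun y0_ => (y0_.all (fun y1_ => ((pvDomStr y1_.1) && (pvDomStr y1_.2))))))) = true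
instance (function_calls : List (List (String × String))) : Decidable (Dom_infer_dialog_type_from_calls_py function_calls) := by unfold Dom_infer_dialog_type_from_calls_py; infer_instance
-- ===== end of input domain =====

-- B: same classification by a single early-exit scan tracking only the first truthy name (simpler; no set is built).
-- ===== PORT A =====
-- call.get("name") as a truthy value: some s with s ≠ "" (None and "" are falsy).
-- dict.get ported by hand as first-match lookup on the association list (exact: a Python dict has unique keys)
def pvTruthyName (call : List (String × String)) : Option String :=
  match (call.find? (fun kv => kv.1 == "name")).map (·.2) with
  | some s => if s ≠ "" then some s else none
  | none => none

def infer_dialog_type_from_calls_py (function_calls : List (List (String × String))) : Option String :=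
  if function_calls = [] then some "non_tool"
  else
    let unique_apis : PySem.Set String := PySem.Set.ofList (function_calls.filterMap pvTruthyName)
    if unique_apis.length = 1 ∧ function_calls.length = 1 then some "single"
    else if unique_apis.length > 1 then some "parallel"
    else some "single"

-- ===== PORT B =====
-- the for-loop of Source B: `first` is the first truthy name seen; early return on a second distinct one
def pvAltScan (first : Option String) : List (List (String × String)) → Option String
  | [] => some "single"
  | call :: rest =>
    match pvTruthyName call with
    | some name =>
      match first with
      | none => pvAltScan (some name) rest
      | some f => if name ≠ f then some "parallel" else pvAltScan first rest
    | none => pvAltScan first rest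

def infer_dialog_type_from_calls_py_alt (function_calls : List (List (String × String))) : Option String :=
  if function_calls = [] then some "non_tool"
  else pvAltScan none function_calls

-- ===== PRECONDITION & SPEC =====
def Spec_infer_dialog_type_from_calls_py (function_calls : List (List (String × String))) (out : Option String) : Prop := out = infer_dialog_type_from_calls_py_alt function_calls
instance (function_calls : List (List (String × String))) (out : Option String) : Decidable (Spec_infer_dialog_type_from_calls_py function_calls out) := by unfold Spec_infer_dialog_type_from_calls_py; infer_instance

-- ===== CLAIM (what is proved, stated in full; the proofs are below) =====
def Claim_equal_infer_dialog_type_from_calls_py : Prop := ∀ (function_calls : List (List (String × String))), Dom_infer_dialog_type_from_calls_py function_calls → Spec_infer_dialog_type_from_calls_py function_calls (infer_dialog_type_from_calls_py function_calls)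

-- ===== LEMMAS AND PROOFS =====

-- ===== VERDICT (by name: the statement is the Claim_ definition above) =====
-- scan over the extracted truthy names only (proof helper)
def pvGoN (first : Option String) : List String → Option String
  | [] => some "single"
  | n :: rest =>
    match first with
    | none => pvGoN (some n) rest
    | some f => if n ≠ f then some "parallel" else pvGoN first rest

theorem pvAltScan_eq_goN (fc : List (List (String × String))) (first : Option String) :
    pvAltScan first fc = pvGoN first (fc.filterMap pvTruthyName) := by
  induction fc generalizing first with
  | nil => rfl
  | cons c rest ih =>
    simp only [pvAltScan, List.filterMap_cons]
    cases h : pvTruthyName c with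
    | none => simp [ih]
    | some n =>
      cases first with
      | none => simp [pvGoN, ih]
      | some f =>
        by_cases hnf : n = f <;> simp [pvGoN, hnf, ih]

theorem pvGoN_some (f : String) (ns : List String) :
    pvGoN (some f) ns = if ∃ b ∈ ns, b ≠ f then some "parallel" else some "single" := by
  induction ns with
  | nil => simp [pvGoN]
  | cons n rest ih =>
    by_cases hnf : n = f
    · subst hnf; simp [pvGoN, ih]
    · simp [pvGoN, hnf]

theorem pv_len_le_foldl_add (l : List String) (s : PySem.Set String) :
    s.length ≤ (l.foldl PySem.Set.add s).length := by
  induction l generalizing s with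
  | nil => simp
  | cons x r ih =>
    refine le_trans ?_ (ih (PySem.Set.add s x))
    simp only [PySem.Set.add]
    split <;> simp

theorem pv_key (a : String) (rest : List String) :
    1 < (rest.foldl PySem.Set.add [a]).length ↔ ∃ b ∈ rest, b ≠ a := by
  induction rest with
  | nil => simp
  | cons b r ih =>
    by_cases hba : b = a
    · subst hba
      have : PySem.Set.add [b] b = [b] := by simp [PySem.Set.add, PySem.Set.contains]
      simp [List.foldl, this, ih]
    · have hadd : PySem.Set.add [a] b = [a, b] := by
        simp [PySem.Set.add, PySem.Set.contains, hba]
      have h2 : (2 : ℕ) ≤ (r.foldl PySem.Set.add [a, b]).length := by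
        simpa using pv_len_le_foldl_add r [a, b]
      simp only [List.foldl, hadd]
      constructor
      · intro _; exact ⟨b, by simp, hba⟩
      · intro _; omega

-- ===== VERDICT (by name: the statement is the Claim_ definition above) =====
theorem infer_dialog_type_from_calls_py_spec : Claim_equal_infer_dialog_type_from_calls_py := by
  intro fc _
  unfold Spec_infer_dialog_type_from_calls_py
  unfold infer_dialog_type_from_calls_py infer_dialog_type_from_calls_py_alt
  by_cases hfc : fc = []
  · simp [hfc]
  · simp only [hfc, if_false]
    rw [pvAltScan_eq_goN]
    cases hns : fc.filterMap pvTruthyName with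
    | nil => simp [pvGoN, hns, PySem.Set.ofList]
    | cons n rest =>
      simp only [hns, PySem.Set.ofList, pvGoN, List.foldl]
      have hadd : PySem.Set.empty.add n = [n] := by
        simp [PySem.Set.add, PySem.Set.empty, PySem.Set.contains]
      simp only [hadd]
      rw [pvGoN_some]
      rcases Nat.lt_or_ge 1 (rest.foldl PySem.Set.add [n]).length with hgt | hle
      · have hex : ∃ b ∈ rest, b ≠ n := (pv_key n rest).mp hgt
        simp only [if_pos hex]
        split_ifs with h1 <;> first | (exact absurd hgt (by omega)) | rfl
      · have hnex : ¬ ∃ b ∈ rest, b ≠ n := fun h => by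
          have := (pv_key n rest).mpr h; omega
        have hge1 : 1 ≤ (rest.foldl PySem.Set.add [n]).length := by
          simpa using pv_len_le_foldl_add rest [n]
        simp only [if_neg hnex]
        split_ifs with h1 h2 <;> first | rfl | omega
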